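-- pv_equiv track=rewrite | github.com/chips-wq/advent-of-code | 2025/day4/part2.py | step_remove
-- ===== SOURCE A (Python) =====
-- def step_remove(mat: list[list[str]]):
--     ret = [list(line) for line in mat]
--     dirs = [(-1, -1), (-1, 0), (-1, 1), (0, -1), (0, 1), (1, -1), (1, 0), (1, 1)]
--     assert len(dirs) == 8
--
--     cnt = 0
--     n, m = len(mat), len(mat[0])
--     for i, line in enumerate(mat):
--         for j, el in enumerate(line):
--             if el != '@': continue
--             # Find out how many adjacent @ there are
--             c_adj = 0
--             for di, dj in dirs:
--                 r, c = i + di, j + dj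
--                 if r < 0 or r >= n or c < 0 or c >= m: continue
--                 if mat[r][c] == '@': c_adj += 1
--             if c_adj < 4:
--                 ret[i][j] = '.'
--                 cnt += 1
--     return (ret, cnt)
-- ===== SOURCE B (Python) =====
-- def step_remove(mat: list[list[str]]):
--     n, m = len(mat), len(mat[0])
--
--     # scatter: each '@' cell adds 1 to the neighbour count of its 8 neighbours
--     count = {}
--     for i in range(n):
--         for j in range(m):
--             if mat[i][j] == '@':
--                 for di, dj in ((-1, -1), (-1, 0), (-1, 1), (0, -1),
--                                (0, 1), (1, -1), (1, 0), (1, 1)):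
--                     key = (i + di, j + dj)
--                     count[key] = count.get(key, 0) + 1
--
--     cnt = 0
--     ret = []
--     for i, row in enumerate(mat):
--         new_row = []
--         for j, el in enumerate(row):
--             if el == '@' and count.get((i, j), 0) < 4:
--                 new_row.append('.')
--                 cnt += 1
--             else:
--                 new_row.append(el)
--         ret.append(new_row)
--     return (ret, cnt)
-- ===== Notes on version B (the rewrite author's own statement) =====
-- stated objective: alternative
-- what changed: B replaces A's per-cell probe of the 8 neighbours by a single scatter pass that adds 1 into a dictionary of neighbour counts for every '@' cell, then rebuilds the grid in one pass from that dictionary; Pre_ excludes the empty grid (A raises IndexError) and grids with a row shorter than row 0, on which B's scatter raises IndexError while A raises too unless no '@' probe touches the missing cells.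
-- outside the precondition, e.g. on step_remove([['.', '.'], ['.']]): A returns ([['.', '.'], ['.']], 0), B raises IndexError
import Mathlib
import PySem

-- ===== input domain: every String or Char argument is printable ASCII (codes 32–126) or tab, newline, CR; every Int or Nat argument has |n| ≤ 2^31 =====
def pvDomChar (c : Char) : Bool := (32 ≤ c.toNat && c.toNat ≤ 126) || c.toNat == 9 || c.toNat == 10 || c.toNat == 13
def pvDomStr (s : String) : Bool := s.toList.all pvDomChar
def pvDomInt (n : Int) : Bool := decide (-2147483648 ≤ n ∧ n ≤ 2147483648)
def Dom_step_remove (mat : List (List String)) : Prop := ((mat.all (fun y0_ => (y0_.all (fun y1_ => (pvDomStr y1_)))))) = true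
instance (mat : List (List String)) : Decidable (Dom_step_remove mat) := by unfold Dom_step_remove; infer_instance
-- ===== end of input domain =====

-- B replaces A's per-cell probe of the 8 neighbours by one scatter pass that adds 1
-- into a dictionary of neighbour counts for each '@' cell, then a single rebuild pass
-- (objective: alternative algorithm, same asymptotic cost).  Equality of the return
-- values is proved on Pre_ (non-empty grids, no row shorter than row 0); A mutates
-- nothing observable.

-- ===== PORT A =====
def pvDirs : List (Int × Int) := [(-1,-1),(-1,0),(-1,1),(0,-1),(0,1),(1,-1),(1,0),(1,1)]

def pvCAdj (mat : List (List String)) (n m i j : Int) : Int :=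
  pvDirs.foldl (fun cadj d =>
    let r := i + d.1
    let c := j + d.2
    if r < 0 ∨ n ≤ r ∨ c < 0 ∨ m ≤ c then cadj
    else if PySem.List.pyGetD (PySem.List.pyGetD mat r []) c "" = "@" then cadj + 1
    else cadj) 0

def step_remove (mat : List (List String)) : List (List String) × Int :=
  let ret := mat
  let n : Int := (mat.length : Int)
  let m : Int := ((PySem.List.pyGetD mat 0 []).length : Int)
  (PySem.List.enumerate mat 0).foldl
    (fun st il =>
      (PySem.List.enumerate il.2 0).foldl
        (fun st2 je =>
          if je.2 ≠ "@" then st2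
          else if pvCAdj mat n m il.1 je.1 < 4 then
            (st2.1.set il.1.toNat ((PySem.List.pyGetD st2.1 il.1 []).set je.1.toNat "."), st2.2 + 1)
          else st2)
        st)
    (ret, 0)

-- ===== PORT B =====
def pvScatter (mat : List (List String)) (n m : Int) : PySem.Dict (Int × Int) Int :=
  (PySem.List.pyRange 0 n 1).foldl (fun cnt i =>
    (PySem.List.pyRange 0 m 1).foldl (fun cnt j =>
      if PySem.List.pyGetD (PySem.List.pyGetD mat i []) j "" = "@" then
        pvDirs.foldl (fun cnt dd =>
          PySem.Dict.insert cnt (i + dd.1, j + dd.2) (PySem.Dict.getD cnt (i + dd.1, j + dd.2) 0 + 1)) cnt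
      else cnt) cnt) PySem.Dict.empty

def step_remove_alt (mat : List (List String)) : List (List String) × Int :=
  let n : Int := (mat.length : Int)
  let m : Int := ((PySem.List.pyGetD mat 0 []).length : Int)
  let count := pvScatter mat n m
  (PySem.List.enumerate mat 0).foldl
    (fun st il =>
      let r2 := (PySem.List.enumerate il.2 0).foldl
        (fun st2 je =>
          if je.2 = "@" ∧ PySem.Dict.getD count (il.1, je.1) 0 < 4 then (st2.1 ++ ["."], st2.2 + 1)
          else (st2.1 ++ [je.2], st2.2))
        (([] : List String), st.2)
      (st.1 ++ [r2.1], r2.2))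
    (([] : List (List String)), (0 : Int))

-- ===== PRECONDITION & SPEC =====
-- Pre_ admits the non-empty grids in which no row is shorter than row 0 (in
-- particular every rectangular grid): on the empty grid both Pythons raise
-- IndexError (len(mat[0])), and when some row is shorter than row 0 B's scatter
-- pass raises IndexError while A raises unless no '@' cell is adjacent to the
-- missing cells (on those inputs A's value is an artefact of which cells its
-- probes happen to skip).
def Pre_step_remove (mat : List (List String)) : Prop :=
  mat ≠ [] ∧ ∀ row ∈ mat, (mat.getD 0 []).length ≤ row.length
instance (mat : List (List String)) : Decidable (Pre_step_remove mat) := by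
  unfold Pre_step_remove; infer_instance
def pvWitness_step_remove : List (List String) := [["@"]]

def Spec_step_remove (mat : List (List String)) (out : List (List String) × Int) : Prop := out = step_remove_alt mat
instance (mat : List (List String)) (out : List (List String) × Int) : Decidable (Spec_step_remove mat out) := by unfold Spec_step_remove; infer_instance

-- ===== CLAIM (what is proved, stated in full; the proofs are below) =====
def Claim_equal_step_remove : Prop := ∀ (mat : List (List String)), Dom_step_remove mat → Pre_step_remove mat → Spec_step_remove mat (step_remove mat)

-- ===== LEMMAS AND PROOFS =====

def pvProbe (mat : List (List String)) (n m r c : Int) : Int :=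
  if r < 0 ∨ n ≤ r ∨ c < 0 ∨ m ≤ c then 0
  else if PySem.List.pyGetD (PySem.List.pyGetD mat r []) c "" = "@" then 1 else 0
theorem pvStep_eq (mat : List (List String)) (n m : Int) (acc r c : Int) :
    (if r < 0 ∨ n ≤ r ∨ c < 0 ∨ m ≤ c then acc
     else if PySem.List.pyGetD (PySem.List.pyGetD mat r []) c "" = "@" then acc + 1 else acc)
    = acc + pvProbe mat n m r c := by
  unfold pvProbe; split_ifs <;> omega
theorem pvCAdj_eq (mat : List (List String)) (n m i j : Int) :
    pvCAdj mat n m i j =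
      pvProbe mat n m (i-1) (j-1) + pvProbe mat n m (i-1) j + pvProbe mat n m (i-1) (j+1) +
      pvProbe mat n m i (j-1) + pvProbe mat n m i (j+1) +
      pvProbe mat n m (i+1) (j-1) + pvProbe mat n m (i+1) j + pvProbe mat n m (i+1) (j+1) := by
  simp only [pvCAdj, pvDirs, List.foldl_cons, List.foldl_nil, pvStep_eq]
  ring_nf

-- indicator of an '@' counted by B's prefix sums
def pvCondA (mat : List (List String)) (n m i : Int) (je : Int × String) : Bool :=
  decide (je.2 = "@" ∧ pvCAdj mat n m i je.1 < 4)
def pvCellA (mat : List (List String)) (n m i j : Int) (el : String) : String :=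
  if el = "@" ∧ pvCAdj mat n m i j < 4 then "." else el
def pvRowA (mat : List (List String)) (n m i : Int) (row : List String) : List String :=
  (PySem.List.enumerate row 0).map (fun je => pvCellA mat n m i je.1 je.2)
def pvApply (mat : List (List String)) (n m i : Int) (cur : List String) (l : List String) (j0 : Int) : List String :=
  (PySem.List.enumerate l j0).foldl
    (fun cu je => if pvCondA mat n m i je then cu.set je.1.toNat "." else cu) cur
theorem pvAstep_eq (mat : List (List String)) (n m i : Int) (st : List (List String) × Int) (je : Int × String) :
    (if je.2 ≠ "@" then st
     else if pvCAdj mat n m i je.1 < 4 then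
       (st.1.set i.toNat ((PySem.List.pyGetD st.1 i []).set je.1.toNat "."), st.2 + 1)
     else st)
    = (if pvCondA mat n m i je then
        (st.1.set i.toNat ((PySem.List.pyGetD st.1 i []).set je.1.toNat "."), st.2 + 1)
      else st) := by
  unfold pvCondA
  by_cases h1 : je.2 = "@" <;> by_cases h2 : pvCAdj mat n m i je.1 < 4 <;> simp [h1, h2]
theorem pvInnerA (mat : List (List String)) (n m : Int) (i : Nat) :
    ∀ (l : List String) (j0 : Nat) (ret : List (List String)) (cnt : Int), i < ret.length →
    (PySem.List.enumerate l (j0 : Int)).foldl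
      (fun st2 je =>
        if je.2 ≠ "@" then st2
        else if pvCAdj mat n m (i : Int) je.1 < 4 then
          (st2.1.set (i : Int).toNat ((PySem.List.pyGetD st2.1 (i : Int) []).set je.1.toNat "."), st2.2 + 1)
        else st2) (ret, cnt)
    = (ret.set i (pvApply mat n m (i : Int) (ret.getD i []) l (j0 : Int)),
       cnt + ((PySem.List.enumerate l (j0 : Int)).countP (pvCondA mat n m (i : Int)) : Int)) := by
  intro l
  induction l with
  | nil =>
    intro j0 ret cnt hlen
    simp only [PySem.List.enumerate, List.foldl_nil, pvApply, List.countP_nil, Nat.cast_zero, add_zero]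
    rw [List.getD_eq_getElem ret [] hlen, List.set_getElem_self hlen]
  | cons x xs ih =>
    intro j0 ret cnt hlen
    rw [PySem.List.enumerate_cons, List.foldl_cons, pvAstep_eq]
    have hcast1 : ((j0 : Int) + 1) = ((j0 + 1 : Nat) : Int) := by push_cast; ring
    have happly : pvApply mat n m (i : Int) (ret.getD i []) (x :: xs) (j0 : Int)
        = pvApply mat n m (i : Int)
            (if pvCondA mat n m (i : Int) ((j0 : Int), x) then (ret.getD i []).set j0 "." else ret.getD i [])
            xs ((j0 + 1 : Nat) : Int) := by
      unfold pvApply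
      rw [PySem.List.enumerate_cons, List.foldl_cons, hcast1]
      by_cases hc : pvCondA mat n m (i : Int) ((j0 : Int), x) = true
      · rw [if_pos hc]; dsimp only; rw [Int.toNat_natCast, if_pos hc]
      · rw [if_neg hc, if_neg hc]
    by_cases hc : pvCondA mat n m (i : Int) ((j0 : Int), x) = true
    · rw [if_pos hc]
      dsimp only
      rw [hcast1]
      have hih := ih (j0+1) (ret.set i ((ret.getD i []).set j0 ".")) (cnt+1) (by simpa using hlen)
      simp only [Int.toNat_natCast, PySem.List.pyGetD_natCast] at hih ⊢
      rw [hih]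
      rw [Prod.mk.injEq]
      refine ⟨?_, ?_⟩
      · rw [List.set_set]
        congr 1
        rw [happly, if_pos hc]
        congr 1
        rw [List.getD_eq_getElem _ [] (by simpa using hlen), List.getElem_set_self (by simpa using hlen)]
      · rw [List.countP_cons, if_pos hc]
        push_cast
        ring
    · rw [if_neg hc]
      rw [hcast1, ih (j0+1) ret cnt hlen]
      rw [Prod.mk.injEq]
      refine ⟨?_, ?_⟩
      · congr 1
        rw [happly, if_neg hc]
      · rw [List.countP_cons, if_neg hc]
        push_cast
        ring
theorem pvApply_eq (mat : List (List String)) (n m i : Int) :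
    ∀ (l : List String) (j0 : Nat) (cur : List String), cur.drop j0 = l →
    pvApply mat n m i cur l (j0 : Int)
    = cur.take j0 ++ (PySem.List.enumerate l (j0 : Int)).map (fun je => pvCellA mat n m i je.1 je.2) := by
  intro l
  induction l with
  | nil =>
    intro j0 cur hdrop
    have : cur.length ≤ j0 := by
      by_contra hlt
      rw [not_le] at hlt
      have := List.drop_eq_nil_iff.mp hdrop
      omega
    simp [pvApply, PySem.List.enumerate, List.take_of_length_le this]
  | cons x xs ih =>
    intro j0 cur hdrop
    have hj0 : j0 < cur.length := by
      by_contra hge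
      rw [not_lt] at hge
      rw [List.drop_eq_nil_iff.mpr hge] at hdrop
      simp at hdrop
    have hx : cur[j0] = x := by
      have h0 : (cur.drop j0)[0]'(by rw [hdrop]; simp) = x := by
        simp [hdrop]
      rw [List.getElem_drop] at h0
      simpa using h0
    have hxs : cur.drop (j0 + 1) = xs := by
      have := congrArg List.tail hdrop
      rw [List.tail_drop] at this
      simpa using this
    unfold pvApply
    rw [PySem.List.enumerate_cons, List.foldl_cons]
    have hcast1 : ((j0 : Int) + 1) = ((j0 + 1 : Nat) : Int) := by push_cast; ring
    by_cases hc : pvCondA mat n m i ((j0 : Int), x) = true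
    · rw [if_pos hc, hcast1]
      have hjnat : ((j0 : Int)).toNat = j0 := Int.toNat_natCast j0
      rw [hjnat]
      have hdrop' : (cur.set j0 ".").drop (j0+1) = xs := by
        rw [List.drop_set]
        rw [if_pos (by omega)]
        exact hxs
      have := ih (j0+1) (cur.set j0 ".") hdrop'
      unfold pvApply at this
      rw [this]
      have htake : (cur.set j0 ".").take (j0+1) = cur.take j0 ++ ["."] := by
        rw [List.take_add_one]
        have h1 : (cur.set j0 ".")[j0]? = some "." := by
          simp [hj0]
        rw [h1, List.take_set]
        congr 1
        exact List.set_eq_of_length_le (by simp)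
      rw [htake]
      have hcell : pvCellA mat n m i (j0 : Int) x = "." := by
        unfold pvCellA
        unfold pvCondA at hc
        rw [if_pos (by simpa using hc)]
      simp only [List.map_cons]
      rw [hcell]
      simp [List.append_assoc]
    · rw [if_neg hc, hcast1]
      have := ih (j0+1) cur hxs
      unfold pvApply at this
      rw [this]
      have htake : cur.take (j0+1) = cur.take j0 ++ [x] := by
        rw [List.take_add_one]
        have : cur[j0]? = some x := by
          rw [List.getElem?_eq_getElem hj0, hx]
        rw [this]
        rfl
      have hcell : pvCellA mat n m i (j0 : Int) x = x := by
        unfold pvCellA pvCondA at *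
        rw [if_neg (by simpa using hc)]
      rw [htake]
      simp only [List.map_cons]
      rw [hcell]
      simp [List.append_assoc]
theorem pvOuterA (mat : List (List String)) (n m : Int) :
    ∀ (rows : List (List String)) (s : Nat) (ret : List (List String)) (cnt : Int), ret.drop s = rows →
    (PySem.List.enumerate rows (s : Int)).foldl
      (fun st il =>
        (PySem.List.enumerate il.2 0).foldl
          (fun st2 je =>
            if je.2 ≠ "@" then st2
            else if pvCAdj mat n m il.1 je.1 < 4 then
              (st2.1.set il.1.toNat ((PySem.List.pyGetD st2.1 il.1 []).set je.1.toNat "."), st2.2 + 1)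
            else st2) st) (ret, cnt)
    = (ret.take s ++ (PySem.List.enumerate rows (s : Int)).map (fun il => pvRowA mat n m il.1 il.2),
       cnt + ((PySem.List.enumerate rows (s : Int)).map
         (fun il => ((PySem.List.enumerate il.2 0).countP (pvCondA mat n m il.1) : Int))).sum) := by
  intro rows
  induction rows with
  | nil =>
    intro s ret cnt hdrop
    have : ret.length ≤ s := by
      by_contra hlt
      rw [not_le] at hlt
      have := List.drop_eq_nil_iff.mp hdrop
      omega
    simp [PySem.List.enumerate, List.take_of_length_le this]
  | cons r rs ih =>
    intro s ret cnt hdrop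
    have hs : s < ret.length := by
      by_contra hge
      rw [not_lt] at hge
      rw [List.drop_eq_nil_iff.mpr hge] at hdrop
      simp at hdrop
    have hr : ret[s] = r := by
      have h0 : (ret.drop s)[0]'(by rw [hdrop]; simp) = r := by simp [hdrop]
      rw [List.getElem_drop] at h0
      simpa using h0
    have hrs : ret.drop (s + 1) = rs := by
      have := congrArg List.tail hdrop
      rw [List.tail_drop] at this
      simpa using this
    rw [PySem.List.enumerate_cons, List.foldl_cons]
    dsimp only
    have hin := pvInnerA mat n m s r 0 ret cnt hs
    simp only [Nat.cast_zero] at hin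
    rw [hin]
    have hgd : ret.getD s [] = r := by rw [List.getD_eq_getElem ret [] hs, hr]
    have happ := pvApply_eq mat n m (s : Int) r 0 r (by simp)
    simp only [Nat.cast_zero, List.take_zero, List.nil_append] at happ
    rw [hgd, happ]
    have hcast1 : ((s : Int) + 1) = ((s + 1 : Nat) : Int) := by push_cast; ring
    have hdrop' : (ret.set s (pvRowA mat n m (s:Int) r)).drop (s+1) = rs := by
      rw [List.drop_set, if_pos (by omega)]
      exact hrs
    have hih := ih (s+1) (ret.set s (pvRowA mat n m (s:Int) r)) (cnt + ((PySem.List.enumerate r 0).countP (pvCondA mat n m (s:Int)) : Int)) hdrop'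
    rw [show ((PySem.List.enumerate r 0).map (fun je => pvCellA mat n m (s:Int) je.1 je.2)) = pvRowA mat n m (s:Int) r from rfl]
    rw [hcast1, hih]
    rw [Prod.mk.injEq]
    refine ⟨?_, ?_⟩
    · have htake : (ret.set s (pvRowA mat n m (s:Int) r)).take (s+1)
          = ret.take s ++ [pvRowA mat n m (s:Int) r] := by
        rw [List.take_add_one]
        have h1 : (ret.set s (pvRowA mat n m (s:Int) r))[s]? = some (pvRowA mat n m (s:Int) r) := by
          simp [hs]
        rw [h1, List.take_set]
        congr 1
        exact List.set_eq_of_length_le (by simp)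
      rw [htake]
      simp only [List.map_cons]
      simp [List.append_assoc]
    · simp only [List.map_cons, List.sum_cons]
      push_cast
      ring

-- ---- B-side loop characterization ----
theorem pvA_canon (mat : List (List String)) :
    step_remove mat
    = ((PySem.List.enumerate mat 0).map
        (fun il => pvRowA mat (mat.length : Int) ((PySem.List.pyGetD mat 0 []).length : Int) il.1 il.2),
       ((PySem.List.enumerate mat 0).map
        (fun il => ((PySem.List.enumerate il.2 0).countP
          (pvCondA mat (mat.length : Int) ((PySem.List.pyGetD mat 0 []).length : Int) il.1) : Int))).sum) := by
  unfold step_remove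
  have h := pvOuterA mat (mat.length : Int) ((PySem.List.pyGetD mat 0 []).length : Int) mat 0 mat 0 (by simp)
  norm_num at h ⊢
  rw [h]

-- ---- B-side: the scatter dictionary counts exactly A's neighbour probes ----

theorem pvIncFold (k : (Int × Int) → (Int × Int)) (t : Int × Int) :
    ∀ (ds : List (Int × Int)) (d : PySem.Dict (Int × Int) Int),
    PySem.Dict.getD (ds.foldl (fun cnt dd => PySem.Dict.insert cnt (k dd) (PySem.Dict.getD cnt (k dd) 0 + 1)) d) t 0
    = PySem.Dict.getD d t 0 + (ds.map (fun dd => if k dd = t then (1:Int) else 0)).sum := by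
  intro ds
  induction ds with
  | nil => intro d; simp
  | cons dd ds ih =>
    intro d
    rw [List.foldl_cons, ih]
    have hstep : PySem.Dict.getD (PySem.Dict.insert d (k dd) (PySem.Dict.getD d (k dd) 0 + 1)) t 0
        = PySem.Dict.getD d t 0 + (if k dd = t then (1:Int) else 0) := by
      by_cases h : k dd = t
      · rw [h]; simp [PySem.Dict.getD_insert]
      · simp [PySem.Dict.getD_insert, Ne.symm h, h]
    rw [hstep]
    simp only [List.map_cons, List.sum_cons]
    ring

def pvFj (mat : List (List String)) (i : Int) (t : Int × Int) (j : Int) : Int :=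
  if PySem.List.pyGetD (PySem.List.pyGetD mat i []) j "" = "@"
  then (pvDirs.map (fun dd => if (i + dd.1, j + dd.2) = t then (1:Int) else 0)).sum
  else 0

theorem pvFoldAdd {α : Type} (f : PySem.Dict (Int × Int) Int → α → PySem.Dict (Int × Int) Int)
    (F : α → Int) (t : Int × Int)
    (h : ∀ d x, PySem.Dict.getD (f d x) t 0 = PySem.Dict.getD d t 0 + F x) :
    ∀ (L : List α) (d0 : PySem.Dict (Int × Int) Int),
    PySem.Dict.getD (L.foldl f d0) t 0 = PySem.Dict.getD d0 t 0 + (L.map F).sum := by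
  intro L
  induction L with
  | nil => intro d0; simp
  | cons x xs ih =>
    intro d0
    rw [List.foldl_cons, ih, h]
    simp only [List.map_cons, List.sum_cons]
    ring

theorem pvStepj (mat : List (List String)) (i : Int) (t : Int × Int) :
    ∀ (d : PySem.Dict (Int × Int) Int) (j : Int),
    PySem.Dict.getD
      (if PySem.List.pyGetD (PySem.List.pyGetD mat i []) j "" = "@" then
        pvDirs.foldl (fun cnt dd =>
          PySem.Dict.insert cnt (i + dd.1, j + dd.2) (PySem.Dict.getD cnt (i + dd.1, j + dd.2) 0 + 1)) d
      else d) t 0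
    = PySem.Dict.getD d t 0 + pvFj mat i t j := by
  intro d j
  unfold pvFj
  by_cases h : PySem.List.pyGetD (PySem.List.pyGetD mat i []) j "" = "@"
  · rw [if_pos h, if_pos h]
    exact pvIncFold (fun dd => (i + dd.1, j + dd.2)) t pvDirs d
  · rw [if_neg h, if_neg h]; ring

theorem pvScatter_sum (mat : List (List String)) (n m : Int) (t : Int × Int) :
    PySem.Dict.getD (pvScatter mat n m) t 0
    = ((PySem.List.pyRange 0 n 1).map (fun i =>
        ((PySem.List.pyRange 0 m 1).map (pvFj mat i t)).sum)).sum := by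
  unfold pvScatter
  rw [pvFoldAdd _ (fun i => ((PySem.List.pyRange 0 m 1).map (pvFj mat i t)).sum) t
      (fun d i => pvFoldAdd _ (pvFj mat i t) t (pvStepj mat i t) (PySem.List.pyRange 0 m 1) d)]
  simp

theorem pvSumPoint1 (b : Int) (c : Int) :
    ∀ (l : List Int), l.Nodup →
    (l.map (fun j => if j = b then c else 0)).sum = if b ∈ l then c else 0 := by
  intro l
  induction l with
  | nil => simp
  | cons x xs ih =>
    intro hnd
    rw [List.map_cons, List.sum_cons, ih (List.nodup_cons.mp hnd).2]
    by_cases hx : x = b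
    · subst hx
      have hnot : x ∉ xs := (List.nodup_cons.mp hnd).1
      simp [hnot]
    · simp [hx, Ne.symm hx]

theorem pvPointShift (mat : List (List String)) (n m d1 d2 t1 t2 a b : Int)
    (ha : t1 = a + d1) (hb : t2 = b + d2) :
    ((PySem.List.pyRange 0 n 1).map (fun i =>
      ((PySem.List.pyRange 0 m 1).map (fun j =>
        if (i + d1, j + d2) = (t1, t2) ∧ PySem.List.pyGetD (PySem.List.pyGetD mat i []) j "" = "@"
        then (1:Int) else 0)).sum)).sum
    = pvProbe mat n m a b := by
  subst ha hb
  have hinner : ∀ i : Int,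
      ((PySem.List.pyRange 0 m 1).map (fun j =>
        if (i + d1, j + d2) = (a + d1, b + d2) ∧ PySem.List.pyGetD (PySem.List.pyGetD mat i []) j "" = "@"
        then (1:Int) else 0)).sum
      = if b ∈ PySem.List.pyRange 0 m 1 then
          (if i = a ∧ PySem.List.pyGetD (PySem.List.pyGetD mat i []) b "" = "@" then (1:Int) else 0)
        else 0 := by
    intro i
    rw [show (fun j => if (i + d1, j + d2) = (a + d1, b + d2) ∧ PySem.List.pyGetD (PySem.List.pyGetD mat i []) j "" = "@" then (1:Int) else 0)
        = (fun j => if j = b then (if i = a ∧ PySem.List.pyGetD (PySem.List.pyGetD mat i []) b "" = "@" then (1:Int) else 0) else 0) from ?_]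
    · exact pvSumPoint1 b _ _ (PySem.List.nodup_pyRange_one 0 m)
    · funext j
      by_cases hj : j = b
      · subst hj
        rw [if_pos rfl]
        apply if_congr _ rfl rfl
        constructor
        · rintro ⟨hp, hr⟩
          have h1 : i + d1 = a + d1 := congrArg Prod.fst hp
          exact ⟨by omega, hr⟩
        · rintro ⟨h1, hr⟩
          subst h1
          exact ⟨rfl, hr⟩
      · rw [if_neg hj, if_neg]
        rintro ⟨hp, _⟩
        have h2 : j + d2 = b + d2 := congrArg Prod.snd hp
        exact hj (by omega)
  rw [show (fun i => ((PySem.List.pyRange 0 m 1).map (fun j =>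
        if (i + d1, j + d2) = (a + d1, b + d2) ∧ PySem.List.pyGetD (PySem.List.pyGetD mat i []) j "" = "@"
        then (1:Int) else 0)).sum)
      = (fun i => if i = a then
          (if b ∈ PySem.List.pyRange 0 m 1 ∧ PySem.List.pyGetD (PySem.List.pyGetD mat a []) b "" = "@"
           then (1:Int) else 0) else 0) from ?_]
  · rw [pvSumPoint1 a _ _ (PySem.List.nodup_pyRange_one 0 n)]
    unfold pvProbe
    simp only [PySem.List.mem_pyRange_one]
    by_cases hA : 0 ≤ a ∧ a < n
    · by_cases hB : 0 ≤ b ∧ b < m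
      · by_cases hr : PySem.List.pyGetD (PySem.List.pyGetD mat a []) b "" = "@"
        · rw [if_pos hA, if_pos ⟨hB, hr⟩,
              if_neg (show ¬(a < 0 ∨ n ≤ a ∨ b < 0 ∨ m ≤ b) by omega), if_pos hr]
        · rw [if_pos hA, if_neg (fun hc => hr hc.2),
              if_neg (show ¬(a < 0 ∨ n ≤ a ∨ b < 0 ∨ m ≤ b) by omega), if_neg hr]
      · rw [if_pos hA, if_neg (fun hc => hB hc.1),
            if_pos (show a < 0 ∨ n ≤ a ∨ b < 0 ∨ m ≤ b by omega)]
    · rw [if_neg hA, if_pos (show a < 0 ∨ n ≤ a ∨ b < 0 ∨ m ≤ b by omega)]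
  · funext i
    rw [hinner i]
    by_cases hi : i = a
    · subst hi
      by_cases hbm : b ∈ PySem.List.pyRange 0 m 1
      · simp [hbm]
      · simp [hbm]
    · by_cases hbm : b ∈ PySem.List.pyRange 0 m 1
      · simp [hbm, hi]
      · simp [hbm, hi]

theorem pvFj_expand (mat : List (List String)) (i : Int) (t1 t2 : Int) :
    pvFj mat i (t1, t2)
    = fun j =>
      (if (i + -1, j + -1) = (t1, t2) ∧ PySem.List.pyGetD (PySem.List.pyGetD mat i []) j "" = "@" then (1:Int) else 0)
    + (if (i + -1, j + 0) = (t1, t2) ∧ PySem.List.pyGetD (PySem.List.pyGetD mat i []) j "" = "@" then (1:Int) else 0)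
    + (if (i + -1, j + 1) = (t1, t2) ∧ PySem.List.pyGetD (PySem.List.pyGetD mat i []) j "" = "@" then (1:Int) else 0)
    + (if (i + 0, j + -1) = (t1, t2) ∧ PySem.List.pyGetD (PySem.List.pyGetD mat i []) j "" = "@" then (1:Int) else 0)
    + (if (i + 0, j + 1) = (t1, t2) ∧ PySem.List.pyGetD (PySem.List.pyGetD mat i []) j "" = "@" then (1:Int) else 0)
    + (if (i + 1, j + -1) = (t1, t2) ∧ PySem.List.pyGetD (PySem.List.pyGetD mat i []) j "" = "@" then (1:Int) else 0)
    + (if (i + 1, j + 0) = (t1, t2) ∧ PySem.List.pyGetD (PySem.List.pyGetD mat i []) j "" = "@" then (1:Int) else 0)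
    + (if (i + 1, j + 1) = (t1, t2) ∧ PySem.List.pyGetD (PySem.List.pyGetD mat i []) j "" = "@" then (1:Int) else 0) := by
  funext j
  unfold pvFj
  by_cases h : PySem.List.pyGetD (PySem.List.pyGetD mat i []) j "" = "@"
  · simp [h, pvDirs]
    ring
  · simp [h]

theorem pvCount_eq_cAdj (mat : List (List String)) (n m i j : Int) :
    PySem.Dict.getD (pvScatter mat n m) (i, j) 0 = pvCAdj mat n m i j := by
  rw [pvScatter_sum, pvCAdj_eq]
  simp only [pvFj_expand]
  simp only [PySem.List.sum_map_add_int]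
  rw [pvPointShift mat n m (-1) (-1) i j (i+1) (j+1) (by ring) (by ring),
      pvPointShift mat n m (-1) 0 i j (i+1) j (by ring) (by ring),
      pvPointShift mat n m (-1) 1 i j (i+1) (j-1) (by ring) (by ring),
      pvPointShift mat n m 0 (-1) i j i (j+1) (by ring) (by ring),
      pvPointShift mat n m 0 1 i j i (j-1) (by ring) (by ring),
      pvPointShift mat n m 1 (-1) i j (i-1) (j+1) (by ring) (by ring),
      pvPointShift mat n m 1 0 i j (i-1) j (by ring) (by ring),
      pvPointShift mat n m 1 1 i j (i-1) (j-1) (by ring) (by ring)]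
  ring

-- ---- B-side rebuild-pass characterization ----

def pvCondB (C : PySem.Dict (Int × Int) Int) (i : Int) (je : Int × String) : Bool :=
  decide (je.2 = "@" ∧ PySem.Dict.getD C (i, je.1) 0 < 4)

theorem pvInnerB (C : PySem.Dict (Int × Int) Int) (i : Int) :
    ∀ (l : List String) (j0 : Nat) (s : List String) (c : Int),
    (PySem.List.enumerate l (j0 : Int)).foldl
      (fun st2 je =>
        if je.2 = "@" ∧ PySem.Dict.getD C (i, je.1) 0 < 4 then (st2.1 ++ ["."], st2.2 + 1)
        else (st2.1 ++ [je.2], st2.2)) (s, c)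
    = (s ++ (PySem.List.enumerate l (j0 : Int)).map (fun je => if pvCondB C i je then "." else je.2),
       c + ((PySem.List.enumerate l (j0 : Int)).countP (pvCondB C i) : Int)) := by
  intro l
  induction l with
  | nil => intro j0 s c; simp [PySem.List.enumerate]
  | cons x xs ih =>
    intro j0 s c
    rw [PySem.List.enumerate_cons, List.foldl_cons]
    have hcast : ((j0 : Int) + 1) = ((j0 + 1 : Nat) : Int) := by push_cast; ring
    by_cases hb : (x = "@" ∧ PySem.Dict.getD C (i, (j0 : Int)) 0 < 4)
    · have hcb : pvCondB C i ((j0 : Int), x) = true := by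
        unfold pvCondB; exact decide_eq_true hb
      rw [if_pos hb]
      dsimp only
      rw [hcast, ih]
      rw [List.map_cons, List.countP_cons, hcb]
      simp only [if_pos rfl]
      rw [Prod.mk.injEq]
      refine ⟨by simp, by push_cast; ring⟩
    · have hcb : pvCondB C i ((j0 : Int), x) = false := by
        unfold pvCondB; exact decide_eq_false hb
      rw [if_neg hb]
      dsimp only
      rw [hcast, ih]
      rw [List.map_cons, List.countP_cons, hcb]
      simp only [Bool.false_eq_true, if_false]
      rw [Prod.mk.injEq]
      refine ⟨by simp, by push_cast; ring⟩

theorem pvOuterB (C : PySem.Dict (Int × Int) Int) :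
    ∀ (rows : List (List String)) (s0 : Nat) (acc : List (List String)) (c : Int),
    (PySem.List.enumerate rows (s0 : Int)).foldl
      (fun st il =>
        let r2 := (PySem.List.enumerate il.2 0).foldl
          (fun st2 je =>
            if je.2 = "@" ∧ PySem.Dict.getD C (il.1, je.1) 0 < 4 then (st2.1 ++ ["."], st2.2 + 1)
            else (st2.1 ++ [je.2], st2.2))
          (([] : List String), st.2)
        (st.1 ++ [r2.1], r2.2)) (acc, c)
    = (acc ++ (PySem.List.enumerate rows (s0 : Int)).map
        (fun il => (PySem.List.enumerate il.2 0).map (fun je => if pvCondB C il.1 je then "." else je.2)),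
       c + ((PySem.List.enumerate rows (s0 : Int)).map
        (fun il => ((PySem.List.enumerate il.2 0).countP (pvCondB C il.1) : Int))).sum) := by
  intro rows
  induction rows with
  | nil => intro s0 acc c; simp [PySem.List.enumerate]
  | cons r rs ih =>
    intro s0 acc c
    rw [PySem.List.enumerate_cons, List.foldl_cons]
    dsimp only
    have hin := pvInnerB C (s0 : Int) r 0 [] c
    simp only [Nat.cast_zero] at hin
    rw [hin]
    have hcast : ((s0 : Int) + 1) = ((s0 + 1 : Nat) : Int) := by push_cast; ring
    rw [hcast, ih]
    rw [Prod.mk.injEq]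
    refine ⟨by simp, ?_⟩
    simp only [List.map_cons, List.sum_cons, List.nil_append]
    push_cast
    ring

theorem pvB_canon (mat : List (List String)) :
    step_remove_alt mat
    = ((PySem.List.enumerate mat 0).map
        (fun il => (PySem.List.enumerate il.2 0).map
          (fun je => if pvCondB (pvScatter mat (mat.length : Int) ((PySem.List.pyGetD mat 0 []).length : Int)) il.1 je then "." else je.2)),
       ((PySem.List.enumerate mat 0).map
        (fun il => ((PySem.List.enumerate il.2 0).countP
          (pvCondB (pvScatter mat (mat.length : Int) ((PySem.List.pyGetD mat 0 []).length : Int)) il.1) : Int))).sum) := by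
  unfold step_remove_alt
  have h := pvOuterB (pvScatter mat (mat.length : Int) ((PySem.List.pyGetD mat 0 []).length : Int)) mat 0 [] 0
  norm_num at h ⊢
  rw [h]

-- ---- assembling both ports ----

theorem pvCond_eq (mat : List (List String)) (i : Int) (je : Int × String) :
    pvCondA mat (mat.length : Int) ((PySem.List.pyGetD mat 0 []).length : Int) i je
    = pvCondB (pvScatter mat (mat.length : Int) ((PySem.List.pyGetD mat 0 []).length : Int)) i je := by
  unfold pvCondA pvCondB
  rw [pvCount_eq_cAdj]

theorem pvCell_eq (mat : List (List String)) (i j : Int) (el : String) :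
    pvCellA mat (mat.length : Int) ((PySem.List.pyGetD mat 0 []).length : Int) i j el
    = (if pvCondB (pvScatter mat (mat.length : Int) ((PySem.List.pyGetD mat 0 []).length : Int)) i (j, el) then "." else el) := by
  unfold pvCellA
  rw [← pvCond_eq]
  unfold pvCondA
  by_cases h : (el = "@" ∧ pvCAdj mat (mat.length : Int) ((PySem.List.pyGetD mat 0 []).length : Int) i j < 4)
  · rw [if_pos h, if_pos (by simpa using decide_eq_true h)]
  · rw [if_neg h, if_neg (by simpa using decide_eq_false h)]

theorem pvPorts_eq (mat : List (List String)) : step_remove mat = step_remove_alt mat := by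
  rw [pvA_canon, pvB_canon]
  rw [Prod.mk.injEq]
  refine ⟨?_, ?_⟩
  · apply List.map_congr_left
    intro il _
    unfold pvRowA
    apply List.map_congr_left
    intro je _
    exact pvCell_eq mat il.1 je.1 je.2
  · congr 1
    apply List.map_congr_left
    intro il _
    congr 1
    apply List.countP_congr
    intro je _
    rw [pvCond_eq mat il.1 je]

-- ===== VERDICT (by name: the statement is the Claim_ definition above) =====
theorem step_remove_spec : Claim_equal_step_remove := by
  intro mat _ _
  unfold Spec_step_remove
  exact pvPorts_eq mat
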